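-- pv_equiv track=rewrite | github.com/matthias-schmidt/number-sequences | unique digits sequence.py | count
-- ===== SOURCE A (Python) =====
-- from itertools import product
-- from bisect import bisect_left
-- from itertools import product
--
-- def count(start,ex):
--     digits = [char for char in ["0","1","2","3","4","5","6","7","8","9"] if char not in ex]
--     start = tuple(str(start))
--     length = len(start)
--     startctr = bisect_left(list(product(digits, repeat = length)),start)
--     ctr = (i for i in list(product(digits, repeat = length))[startctr:])
--     res = []
--     for i in range(3):
--         res.append(''.join(next(ctr)))
--     return res
-- ===== SOURCE B (Python) =====
-- def count(start, ex):
--     # base-k arithmetic instead of materialising all k**n products: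
--     # rank the start string, then unrank the next three indices digit by digit.
--     digits = [d for d in "0123456789" if d not in ex]
--     k = len(digits)
--     s = str(start)
--     n = len(s)
--     # r = number of length-n words over `digits` lexicographically smaller than s
--     r = 0
--     for i, c in enumerate(s):
--         r += sum(1 for d in digits if d < c) * k ** (n - 1 - i)
--         if c not in digits:
--             break
--     res = []
--     for idx in (r, r + 1, r + 2):
--         w = ''
--         for _ in range(n):
--             idx, q = divmod(idx, k)
--             w = digits[q] + w
--         res.append(w)
--     return res
-- ===== Notes on version B (the rewrite author's own statement) =====
-- stated objective: faster
-- what changed: Instead of materialising and scanning all k^n digit products and bisecting, B computes the start string's rank arithmetically digit by digit and unranks the next three indices in base k.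
import Mathlib
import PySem

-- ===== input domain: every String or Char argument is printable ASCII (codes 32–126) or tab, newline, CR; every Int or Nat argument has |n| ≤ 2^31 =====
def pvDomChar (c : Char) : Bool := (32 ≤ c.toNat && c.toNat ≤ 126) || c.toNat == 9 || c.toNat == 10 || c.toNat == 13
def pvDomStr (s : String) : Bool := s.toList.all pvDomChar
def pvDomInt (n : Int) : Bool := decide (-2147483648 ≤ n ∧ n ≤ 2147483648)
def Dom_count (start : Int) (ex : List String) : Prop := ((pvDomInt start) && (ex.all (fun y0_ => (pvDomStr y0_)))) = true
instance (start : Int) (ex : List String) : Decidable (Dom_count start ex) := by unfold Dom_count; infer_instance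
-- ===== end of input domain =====

-- B replaces A's materialisation of all k^n digit products with base-k arithmetic
-- (rank the start string, unrank the next three indices): objective faster (asymptotic).

-- shared by both ports: the allowed digits (Python: the identical filter line in A and B;
-- Python's single-character strings are represented as Char)
def pvDigits (ex : List String) : List Char :=
  ("0123456789".toList).filter (fun c => !(ex.contains (String.singleton c)))

-- ===== PORT A =====
-- itertools.product(digits, repeat = n) in its generation order (last coordinate fastest)
def pyProduct (D : List Char) : Nat → List (List Char)
  | 0 => [[]]
  | n + 1 => D.flatMap (fun d => (pyProduct D n).map (fun t => d :: t))

def count (start : Int) (ex : List String) : List String :=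
  let digits := pvDigits ex
  let s := (PySem.Int.toStr start).toList       -- tuple(str(start)): compared as List Char (Python tuples of 1-char strings compare the same way)
  let length := s.length
  let prods := pyProduct digits length
  -- bisect_left ported as the leftmost insertion point (number of smaller elements);
  -- exact here because the product list is sorted
  let startctr := prods.countP (fun w => decide (w < s))
  -- the three next(ctr) calls; Python raises StopIteration if fewer than 3 remain (excluded by Pre_count)
  ((prods.drop startctr).take 3).map (fun w => String.ofList w)

-- ===== PORT B =====
-- sum(1 for d in digits if d < c)
def cntLess (D : List Char) (c : Char) : Nat := D.countP (fun d => decide (d < c))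

-- B's first loop: r += cntLess(c) * k**(n-1-i); break when c not in digits
def rankLoop (D : List Char) (k n : Nat) : List Char → Nat → Nat → Nat
  | [], _, r => r
  | c :: cs, i, r =>
      let r' := r + cntLess D c * k ^ (n - 1 - i)
      if c ∈ D then rankLoop D k n cs (i + 1) r' else r'

-- B's inner loop: n times idx, q = divmod(idx, k); w = digits[q] + w
def unrankLoop (D : List Char) (k : Nat) : Nat → Nat → List Char → List Char
  | 0, _, w => w
  | m + 1, idx, w => unrankLoop D k m (idx / k) (D.getD (idx % k) '?' :: w)

def count_alt (start : Int) (ex : List String) : List String :=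
  let digits := pvDigits ex
  let k := digits.length
  let s := (PySem.Int.toStr start).toList
  let n := s.length
  let r := rankLoop digits k n s 0 0
  [r, r + 1, r + 2].map (fun idx => String.ofList (unrankLoop digits k n idx []))

-- ===== PRECONDITION & SPEC =====
-- clean rank recursion used only by Pre_count and the proofs:
-- number of length-|cs| words over D lexicographically smaller than cs
def rankR (D : List Char) : List Char → Nat
  | [] => 0
  | c :: cs => cntLess D c * D.length ^ cs.length + (if c ∈ D then rankR D cs else 0)

-- Pre_count excludes exactly the inputs on which A raises StopIteration: fewer than 3
-- length-n strings over the allowed digits are ≥ str(start) (in particular, all digits excluded).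
def Pre_count (start : Int) (ex : List String) : Prop :=
  rankR (pvDigits ex) (PySem.Int.toStr start).toList + 3
    ≤ (pvDigits ex).length ^ (PySem.Int.toStr start).toList.length
instance (start : Int) (ex : List String) : Decidable (Pre_count start ex) := by
  unfold Pre_count; infer_instance

def pvWitness_count : Int × List String := (5, [])

def Spec_count (start : Int) (ex : List String) (out : List String) : Prop := out = count_alt start ex
instance (start : Int) (ex : List String) (out : List String) : Decidable (Spec_count start ex out) := by unfold Spec_count; infer_instance

-- ===== CLAIM (what is proved, stated in full; the proofs are below) =====
def Claim_equal_count : Prop := ∀ (start : Int) (ex : List String), Dom_count start ex → Pre_count start ex → Spec_count start ex (count start ex)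

-- ===== LEMMAS AND PROOFS =====

-- the word at index i (most-significant base-k digit first)
def unrankL (D : List Char) (k : Nat) : Nat → Nat → List Char
  | 0, _ => []
  | m + 1, i => D.getD (i / k ^ m) '?' :: unrankL D k m (i % k ^ m)

theorem flatMap_range_block (L : List Char) (m : Nat) (hm : 0 < m) (u : Nat → List Char) :
    (L.flatMap fun d => (List.range m).map (fun j => d :: u j))
      = (List.range (L.length * m)).map (fun i => L.getD (i / m) '?' :: u (i % m)) := by
  induction L with
  | nil => simp
  | cons c L' ih =>
      rw [List.flatMap_cons, ih,
        show (c :: L').length * m = m + L'.length * m by simp [Nat.succ_mul]; ring,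
        List.range_add, List.map_append]
      congr 1
      · apply List.map_congr_left
        intro a ha
        rw [List.mem_range] at ha
        rw [Nat.div_eq_of_lt ha, Nat.mod_eq_of_lt ha, List.getD_cons_zero]
      · rw [List.map_map]
        apply List.map_congr_left
        intro a _
        simp only [Function.comp]
        rw [show m + a = a + m by ring, Nat.add_div_right _ hm, Nat.add_mod_right,
          List.getD_cons_succ]

theorem pyProduct_eq (D : List Char) (hD : 0 < D.length) (n : Nat) :
    pyProduct D n = (List.range (D.length ^ n)).map (unrankL D D.length n) := by
  induction n with
  | zero => simp [pyProduct, unrankL]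
  | succ n ih =>
      rw [pyProduct, ih]
      have hm : 0 < D.length ^ n := pow_pos hD n
      calc (D.flatMap fun d => ((List.range (D.length ^ n)).map (unrankL D D.length n)).map (fun t => d :: t))
          = (D.flatMap fun d => (List.range (D.length ^ n)).map (fun j => d :: unrankL D D.length n j)) := by
            simp [List.map_map, Function.comp_def]
        _ = (List.range (D.length * D.length ^ n)).map
              (fun i => D.getD (i / D.length ^ n) '?' :: unrankL D D.length n (i % D.length ^ n)) :=
            flatMap_range_block D _ hm _
        _ = (List.range (D.length ^ (n + 1))).map (unrankL D D.length (n + 1)) := by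
            rw [pow_succ' D.length n]; rfl

theorem unrankL_snoc (D : List Char) (k : Nat) (hk : 0 < k) :
    ∀ (n i : Nat), i < k ^ (n + 1) →
      unrankL D k (n + 1) i = unrankL D k n (i / k) ++ [D.getD (i % k) '?'] := by
  intro n
  induction n with
  | zero =>
      intro i hi
      simp [unrankL, Nat.mod_eq_of_lt (by simpa using hi)]
  | succ n ih =>
      intro i hi
      have h1 : i / k / k ^ n = i / k ^ (n + 1) := by
        rw [Nat.div_div_eq_div_mul, ← pow_succ']
      have h2 : i % k ^ (n + 1) / k = i / k % k ^ n := by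
        rw [pow_succ' k n, Nat.mod_mul_right_div_self]
      have h3 : i % k ^ (n + 1) % k = i % k :=
        Nat.mod_mod_of_dvd i (dvd_pow_self k (Nat.succ_ne_zero n))
      have hlt : i % k ^ (n + 1) < k ^ (n + 1) := Nat.mod_lt _ (pow_pos hk _)
      show D.getD (i / k ^ (n + 1)) '?' :: unrankL D k (n + 1) (i % k ^ (n + 1))
        = D.getD (i / k / k ^ n) '?' :: (unrankL D k n (i / k % k ^ n) ++ [D.getD (i % k) '?'])
      rw [h1, ih _ hlt, h2, h3]

theorem unrankLoop_eq (D : List Char) (k : Nat) (hk : 0 < k) :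
    ∀ (n i : Nat) (acc : List Char), i < k ^ n →
      unrankLoop D k n i acc = unrankL D k n i ++ acc := by
  intro n
  induction n with
  | zero => intro i acc _; simp [unrankLoop, unrankL]
  | succ n ih =>
      intro i acc hi
      have hdiv : i / k < k ^ n := by
        rw [Nat.div_lt_iff_lt_mul hk, ← pow_succ]; exact hi
      rw [unrankLoop, ih _ _ hdiv, unrankL_snoc D k hk n i hi, List.append_assoc,
        List.singleton_append]

theorem rankLoop_eq (D : List Char) (n : Nat) :
    ∀ (cs : List Char) (i r : Nat), i + cs.length = n →
      rankLoop D D.length n cs i r = r + rankR D cs := by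
  intro cs
  induction cs with
  | nil => intro i r _; simp [rankLoop, rankR]
  | cons c cs ih =>
      intro i r h
      have hexp : n - 1 - i = cs.length := by simp at h; omega
      rw [rankLoop, rankR]
      simp only [hexp]
      split
      · rw [ih (i + 1) _ (by simp at h ⊢; omega)]; ring
      · ring

theorem cnt_zero_of_not_lt {D' : List Char} {d c : Char} (hchain : ∀ e ∈ D', d < e)
    (hdc : ¬ d < c) : cntLess D' c = 0 := by
  rw [cntLess, List.countP_eq_zero]
  intro e he
  simp only [decide_eq_true_eq]
  intro hec
  exact absurd (lt_trans hec (lt_of_le_of_lt (not_lt.mp hdc) (hchain e he))) (lt_irrefl e)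

theorem getD_lt_iff (c : Char) :
    ∀ (D : List Char), D.Pairwise (· < ·) → ∀ a, a < D.length →
      (D.getD a '?' < c ↔ a < cntLess D c) := by
  intro D
  induction D with
  | nil => intro _ a ha; simp at ha
  | cons d D' ih =>
      intro hp a ha
      rw [List.pairwise_cons] at hp
      have hcnt : cntLess (d :: D') c = cntLess D' c + (if d < c then 1 else 0) := by
        simp [cntLess, List.countP_cons]
      by_cases hdc : d < c
      · cases a with
        | zero =>
            rw [List.getD_cons_zero, hcnt, if_pos hdc]
            exact iff_of_true hdc (by omega)
        | succ a =>
            rw [List.getD_cons_succ, hcnt, if_pos hdc, ih hp.2 a (by simpa using ha)]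
            omega
      · have hz : cntLess D' c = 0 := cnt_zero_of_not_lt hp.1 hdc
        cases a with
        | zero =>
            rw [List.getD_cons_zero, hcnt, if_neg hdc, hz]
            exact iff_of_false hdc (by omega)
        | succ a =>
            rw [List.getD_cons_succ, hcnt, if_neg hdc, hz]
            have ha' : a < D'.length := by simpa using ha
            have hmem : D'.getD a '?' ∈ D' := by
              rw [List.getD_eq_getElem _ _ ha']; exact List.getElem_mem ha'
            exact iff_of_false (fun h => hdc (lt_trans (hp.1 _ hmem) h)) (by omega)

theorem getD_eq_iff (c : Char) :
    ∀ (D : List Char), D.Pairwise (· < ·) → ∀ a, a < D.length →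
      (D.getD a '?' = c ↔ (c ∈ D ∧ a = cntLess D c)) := by
  intro D
  induction D with
  | nil => intro _ a ha; simp at ha
  | cons d D' ih =>
      intro hp a ha
      rw [List.pairwise_cons] at hp
      have hcnt : cntLess (d :: D') c = cntLess D' c + (if d < c then 1 else 0) := by
        simp [cntLess, List.countP_cons]
      by_cases hdc : d < c
      · cases a with
        | zero =>
            rw [List.getD_cons_zero, hcnt, if_pos hdc]
            exact iff_of_false (ne_of_lt hdc) (fun h => absurd h.2 (by omega))
        | succ a =>
            rw [List.getD_cons_succ, hcnt, if_pos hdc, ih hp.2 a (by simpa using ha)]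
            constructor
            · rintro ⟨hm, he⟩
              exact ⟨List.mem_cons_of_mem d hm, by omega⟩
            · rintro ⟨hm, he⟩
              rcases List.mem_cons.mp hm with h | h
              · exact absurd h.symm (ne_of_lt hdc)
              · exact ⟨h, by omega⟩
      · have hz : cntLess D' c = 0 := cnt_zero_of_not_lt hp.1 hdc
        cases a with
        | zero =>
            rw [List.getD_cons_zero, hcnt, if_neg hdc, hz]
            constructor
            · intro h
              subst h
              exact ⟨List.mem_cons_self, rfl⟩
            · rintro ⟨hm, _⟩
              rcases List.mem_cons.mp hm with h | h
              · exact h.symm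
              · exact absurd (hp.1 _ h) hdc
        | succ a =>
            rw [List.getD_cons_succ, hcnt, if_neg hdc, hz]
            have ha' : a < D'.length := by simpa using ha
            have hmem : D'.getD a '?' ∈ D' := by
              rw [List.getD_eq_getElem _ _ ha']; exact List.getElem_mem ha'
            exact iff_of_false (fun h => hdc (hp.1 _ (h ▸ hmem))) (fun h => absurd h.2 (by omega))

theorem rankR_le (D : List Char) :
    ∀ cs : List Char, rankR D cs ≤ D.length ^ cs.length := by
  intro cs
  induction cs with
  | nil => simp [rankR]
  | cons c cs ih =>
      rw [rankR]
      by_cases hc : c ∈ D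
      · have hlt : cntLess D c < D.length := by
          apply lt_of_le_of_ne List.countP_le_length
          intro hEq
          have := List.countP_eq_length.mp hEq c hc
          simp at this
        rw [if_pos hc]
        calc cntLess D c * D.length ^ cs.length + rankR D cs
            ≤ cntLess D c * D.length ^ cs.length + D.length ^ cs.length := by omega
          _ = (cntLess D c + 1) * D.length ^ cs.length := by ring
          _ ≤ D.length * D.length ^ cs.length := Nat.mul_le_mul_right _ (by omega)
          _ = D.length ^ (c :: cs).length := by rw [List.length_cons, pow_succ']
      · rw [if_neg hc]
        calc cntLess D c * D.length ^ cs.length + 0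
            ≤ D.length * D.length ^ cs.length :=
              by simpa using Nat.mul_le_mul_right _ (List.countP_le_length (l := D))
          _ = D.length ^ (c :: cs).length := by rw [List.length_cons, pow_succ']

theorem unrankL_lt_iff (D : List Char) (hp : D.Pairwise (· < ·)) (hk : 0 < D.length) :
    ∀ (cs : List Char) (i : Nat), i < D.length ^ cs.length →
      (unrankL D D.length cs.length i < cs ↔ i < rankR D cs) := by
  intro cs
  induction cs with
  | nil =>
      intro i hi
      have h0 : i = 0 := by simpa using hi
      subst h0
      constructor
      · intro h; cases h
      · intro h; simp [rankR] at h
  | cons c cs ih =>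
      intro i hi
      set k := D.length with hkdef
      set K := k ^ cs.length with hKdef
      have hK : 0 < K := pow_pos hk _
      have ha : i / K < k := by
        rw [Nat.div_lt_iff_lt_mul hK, hKdef, ← pow_succ']
        simpa using hi
      have hj : i % K < K := Nat.mod_lt _ hK
      have hi_eq : i = i / K * K + i % K := by
        rw [mul_comm]; exact (Nat.div_add_mod i K).symm
      show (D.getD (i / K) '?' :: unrankL D k cs.length (i % K) < c :: cs) ↔ _
      rw [List.cons_lt_cons_iff, rankR, getD_lt_iff c D hp _ ha, getD_eq_iff c D hp _ ha, ih _ hj]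
      simp only [← hkdef, ← hKdef]
      rcases lt_trichotomy (i / K) (cntLess D c) with hlt | heq | hgt
      · refine iff_of_true (Or.inl hlt) ?_
        calc i = i / K * K + i % K := hi_eq
          _ < (i / K + 1) * K := by ring_nf; omega
          _ ≤ cntLess D c * K := Nat.mul_le_mul_right _ (by omega)
          _ ≤ cntLess D c * K + _ := Nat.le_add_right _ _
      · have hsum : i = cntLess D c * K + i % K := by rw [← heq]; exact hi_eq
        by_cases hc : c ∈ D
        · rw [if_pos hc]
          constructor
          · rintro (h | ⟨_, h⟩)
            · exact absurd h (by omega)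
            · omega
          · intro h
            exact Or.inr ⟨⟨hc, heq⟩, by omega⟩
        · rw [if_neg hc]
          constructor
          · rintro (h | ⟨⟨hm, _⟩, _⟩)
            · exact absurd h (by omega)
            · exact absurd hm hc
          · intro h
            exact absurd h (by omega)
      · have hR : rankR D cs ≤ K := rankR_le D cs
        have hite : (if c ∈ D then rankR D cs else 0) ≤ K := by
          split
          · exact hR
          · exact Nat.zero_le K
        have hbound : cntLess D c * K + (if c ∈ D then rankR D cs else 0) ≤ i := by
          calc cntLess D c * K + (if c ∈ D then rankR D cs else 0)
              ≤ cntLess D c * K + K := by omega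
            _ = (cntLess D c + 1) * K := by ring
            _ ≤ i / K * K := Nat.mul_le_mul_right _ (by omega)
            _ ≤ i := Nat.div_mul_le_self i K
        refine iff_of_false ?_ (by omega)
        rintro (h | ⟨⟨_, h⟩, _⟩)
        · exact absurd h (by omega)
        · exact absurd h (by omega)

theorem countP_range_lt (N r : Nat) (hr : r ≤ N) :
    (List.range N).countP (fun i => decide (i < r)) = r := by
  rw [show N = r + (N - r) by omega, List.range_add, List.countP_append]
  have h1 : (List.range r).countP (fun i => decide (i < r)) = r := by
    rw [List.countP_eq_length.mpr]
    · exact List.length_range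
    · intro a ha
      simp [List.mem_range.mp ha]
  have h2 : ((List.range (N - r)).map (fun x => r + x)).countP (fun i => decide (i < r)) = 0 := by
    rw [List.countP_eq_zero]
    intro a ha
    rcases List.mem_map.mp ha with ⟨b, _, rfl⟩
    simp
  omega

theorem take3_drop {α : Type} (l : List α) (r : Nat) (d : α) (h : r + 3 ≤ l.length) :
    (l.drop r).take 3 = [l.getD r d, l.getD (r + 1) d, l.getD (r + 2) d] := by
  rw [List.getD_eq_getElem _ _ (by omega : r < l.length),
    List.getD_eq_getElem _ _ (by omega : r + 1 < l.length),
    List.getD_eq_getElem _ _ (by omega : r + 2 < l.length),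
    List.drop_eq_getElem_cons (by omega),
    List.drop_eq_getElem_cons (l := l) (i := r + 1) (by omega),
    List.drop_eq_getElem_cons (l := l) (i := r + 1 + 1) (by omega)]
  rfl

theorem getD_map_range (N i : Nat) (u : Nat → List Char) (hi : i < N) :
    ((List.range N).map u).getD i [] = u i := by
  rw [List.getD_eq_getElem _ _ (by simpa using hi)]
  simp

theorem digits_pairwise (ex : List String) : (pvDigits ex).Pairwise (· < ·) := by
  apply List.Pairwise.filter
  decide

theorem count_eq_of_pre (start : Int) (ex : List String) (hPre : Pre_count start ex) :
    count start ex = count_alt start ex := by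
  have hp : (pvDigits ex).Pairwise (· < ·) := digits_pairwise ex
  rw [Pre_count] at hPre
  simp only [count, count_alt]
  set D := pvDigits ex with hD
  set s := (PySem.Int.toStr start).toList with hs
  set n := s.length with hn
  set k := D.length with hk
  have hPre' : rankR D s + 3 ≤ k ^ n := hPre
  have hk0 : 0 < k := by
    by_contra hcon
    have h0 : k = 0 := by omega
    have h1 : k ^ n ≤ 1 := by
      rw [h0]
      calc (0 : Nat) ^ n ≤ 1 ^ n := Nat.pow_le_pow_left (by omega) n
        _ = 1 := one_pow n
    omega
  have hprod : pyProduct D n = (List.range (k ^ n)).map (unrankL D k n) := pyProduct_eq D hk0 n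
  have hcount : (pyProduct D n).countP (fun w => decide (w < s)) = rankR D s := by
    rw [hprod, List.countP_map]
    have hcomp : ((fun w => decide (w < s)) ∘ unrankL D k n)
        = fun i => decide (unrankL D k n i < s) := rfl
    rw [hcomp]
    have hcong : (List.range (k ^ n)).countP (fun i => decide (unrankL D k n i < s))
        = (List.range (k ^ n)).countP (fun i => decide (i < rankR D s)) := by
      apply List.countP_congr
      intro i hi
      rw [List.mem_range] at hi
      simp only [decide_eq_true_eq]
      exact unrankL_lt_iff D hp hk0 s i hi
    rw [hcong, countP_range_lt _ _ (by omega)]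
  have hrloop : rankLoop D k n s 0 0 = rankR D s := by
    rw [hk, rankLoop_eq D n s 0 0 (by omega)]
    omega
  rw [hcount, hrloop]
  set r := rankR D s with hr
  have hlen : r + 3 ≤ ((List.range (k ^ n)).map (unrankL D k n)).length := by
    simpa using hPre'
  rw [hprod, take3_drop _ r [] hlen]
  have g1 := getD_map_range (k ^ n) r (unrankL D k n) (by omega)
  have g2 := getD_map_range (k ^ n) (r + 1) (unrankL D k n) (by omega)
  have g3 := getD_map_range (k ^ n) (r + 2) (unrankL D k n) (by omega)
  rw [g1, g2, g3]
  have u1 := unrankLoop_eq D k hk0 n r [] (by omega)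
  have u2 := unrankLoop_eq D k hk0 n (r + 1) [] (by omega)
  have u3 := unrankLoop_eq D k hk0 n (r + 2) [] (by omega)
  simp [u1, u2, u3]

-- ===== VERDICT (by name: the statement is the Claim_ definition above) =====
theorem count_spec : Claim_equal_count := by
  intro start ex _ hPre
  unfold Spec_count
  exact count_eq_of_pre start ex hPre
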